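-- pv_equiv track=rewrite | github.com/Kerram/Deephol-Bert-Zpp | tree_parser.py | is_parsable
-- ===== SOURCE A (Python) =====
-- def find_end_of_subtree(sentence, pos):
--   if sentence[pos] != "(":
--     return pos
--   sum = 1
--   while sum > 0:
--     pos += 1
--     if (pos >= len(sentence)):
--       return -1
--     if sentence[pos] == "(":
--       sum += 1
--     elif sentence[pos] == ")":
--       sum -= 1
--     if sum == 0:
--       return pos
--   return -1
--
-- def is_parsable(sentence):
--   if len(sentence) == 1:
--     return True
--
--   if sentence[0] != '(':
--     return False
--   if find_end_of_subtree(sentence, 0) + 1 != len(sentence):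
--     return False
--   if len(sentence) == 3:
--     return True
--
--   pos = 2
--   while pos + 1 < len(sentence):
--     npos = find_end_of_subtree(sentence, pos) + 1
--     if npos == 0:
--       return False
--     if not is_parsable(sentence[pos:npos]):
--       return False
--     pos = npos
--
--   return True
-- ===== SOURCE B (Python) =====
-- def is_parsable(sentence):
--     if len(sentence) == 1:
--         return True
--     if not sentence or sentence[0] != '(':
--         return False
--     bal = 0
--     for i, c in enumerate(sentence):
--         if c == '(':
--             bal += 1
--         elif c == ')':
--             bal -= 1
--         if bal == 0:
--             return i == len(sentence) - 1
--     return False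
-- ===== Notes on version B (the rewrite author's own statement) =====
-- stated objective: faster
-- what changed: Replaces A's slice-and-rescan recursion by one linear pass over the string tracking the parenthesis balance (A's recursive child checks are provably redundant given its top-level balance check); Pre_ excludes only the empty string, on which A raises IndexError.
-- outside the precondition, e.g. on is_parsable(''): A raises IndexError, B returns False
import Mathlib
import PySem

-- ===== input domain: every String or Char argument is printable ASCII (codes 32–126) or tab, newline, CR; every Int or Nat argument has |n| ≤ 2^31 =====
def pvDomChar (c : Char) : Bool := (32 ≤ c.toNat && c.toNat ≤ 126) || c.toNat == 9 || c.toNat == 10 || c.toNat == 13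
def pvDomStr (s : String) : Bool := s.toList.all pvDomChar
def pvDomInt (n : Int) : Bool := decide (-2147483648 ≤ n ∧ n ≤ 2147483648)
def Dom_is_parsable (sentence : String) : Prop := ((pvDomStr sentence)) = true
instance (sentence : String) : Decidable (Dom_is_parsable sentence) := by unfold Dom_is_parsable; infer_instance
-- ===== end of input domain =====

-- B replaces A's quadratic slice-and-rescan recursion by a single linear pass tracking the
-- parenthesis balance (objective: faster, O(n^2) → O(n)); equivalence is proved on non-empty
-- strings (A raises IndexError on "").

-- ===== PORT A =====
-- the 'while sum > 0' loop of find_end_of_subtree; fuel never runs out: pos grows each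
-- iteration and the loop exits once pos ≥ len
def pvFindLoop (s : List Char) : Nat → Int → Int → Int
  | 0, _, _ => -1
  | f+1, pos, sum =>
    if sum > 0 then
      let pos := pos + 1
      if pos ≥ (s.length : Int) then -1
      else
        match PySem.List.pyGet? s pos with
        | none => -1   -- unreachable: 0 ≤ pos < len along the loop
        | some c =>
          let sum := if c = '(' then sum + 1 else if c = ')' then sum - 1 else sum
          if sum = 0 then pos else pvFindLoop s f pos sum
    else -1

def pvFindEnd (s : List Char) (pos : Int) : Int :=   -- find_end_of_subtree
  match PySem.List.pyGet? s pos with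
  | none => -1   -- IndexError in Python; never reached from is_parsable on Pre_
  | some c => if c ≠ '(' then pos else pvFindLoop s (s.length + 1) pos 1

mutual
-- is_parsable's body on the character list; fuel never runs out: recursion is on strictly
-- shorter slices
def pvA (s : List Char) : Nat → Bool
  | 0 => false
  | f+1 =>
    if s.length = 1 then true
    else
      match PySem.List.pyGet? s 0 with
      | none => false   -- IndexError on the empty string (excluded by Pre_)
      | some c =>
        if c ≠ '(' then false
        else if pvFindEnd s 0 + 1 ≠ (s.length : Int) then false
        else if s.length = 3 then true
        else pvABody s f (s.length + 1) 2
-- the 'while pos + 1 < len' child loop; its own fuel never runs out (pos grows)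
def pvABody (s : List Char) (f : Nat) : Nat → Int → Bool
  | 0, _ => false
  | l+1, pos =>
    if pos + 1 < (s.length : Int) then
      let npos := pvFindEnd s pos + 1
      if npos = 0 then false
      else if !(pvA (PySem.List.slice s (some pos) (some npos)) f) then false
      else pvABody s f l npos
    else true
end

def is_parsable (sentence : String) : Bool :=
  pvA sentence.toList (sentence.toList.length + 1)

-- ===== PORT B =====
-- the 'for i, c in enumerate(sentence)' loop of Source B, with the running index i explicit
def pvScan (n : Nat) : List Char → Nat → Int → Bool
  | [], _, _ => false
  | c :: rest, i, bal =>
    let bal := if c = '(' then bal + 1 else if c = ')' then bal - 1 else bal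
    if bal = 0 then decide (i = n - 1) else pvScan n rest (i+1) bal

def is_parsable_alt (sentence : String) : Bool :=
  let s := sentence.toList
  if s.length = 1 then true
  else if s.length = 0 || !(s.headD ' ' == '(') then false   -- 'not sentence or sentence[0] != "("'
  else pvScan s.length s 0 0

-- ===== PRECONDITION & SPEC =====
-- Pre_ excludes only the empty string, on which A raises IndexError (sentence[0]).
def Pre_is_parsable (sentence : String) : Prop := sentence.toList ≠ []
instance (sentence : String) : Decidable (Pre_is_parsable sentence) := by
  unfold Pre_is_parsable; infer_instance
def pvWitness_is_parsable : String := "(a(b)c)"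

def Spec_is_parsable (sentence : String) (out : Bool) : Prop := out = is_parsable_alt sentence
instance (sentence : String) (out : Bool) : Decidable (Spec_is_parsable sentence out) := by
  unfold Spec_is_parsable; infer_instance

-- ===== CLAIM (what is proved, stated in full; the proofs are below) =====
def Claim_equal_is_parsable : Prop := ∀ (sentence : String), Dom_is_parsable sentence → Pre_is_parsable sentence → Spec_is_parsable sentence (is_parsable sentence)

-- ===== LEMMAS AND PROOFS =====

-- prefix balance of the parenthesis string
def pvDelta (c : Char) : Int := if c = '(' then 1 else if c = ')' then -1 else 0

def pvPB (s : List Char) : Nat → Int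
  | 0 => 0
  | k+1 => pvPB s k + pvDelta (s.getD k ' ')

-- both programs accept exactly this condition: a single char, or '(' followed by a raw
-- parenthesis balance that stays positive and first returns to zero at the very end
def pvCond (s : List Char) : Prop :=
  s.length = 1 ∨ (2 ≤ s.length ∧ s.getD 0 ' ' = '(' ∧ pvPB s s.length = 0 ∧
    ∀ k, 1 ≤ k → k < s.length → 0 < pvPB s k)

-- the span [i, q) is a raw-balanced parenthesized block: balance returns to its entry
-- level exactly at q and stays above it strictly inside
def pvSpan (s : List Char) (i q : Nat) : Prop :=
  i + 2 ≤ q ∧ q ≤ s.length ∧ pvPB s q = pvPB s i ∧ ∀ k, i < k → k < q → pvPB s i < pvPB s k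

-- least raw-balance return point after i (the value find_end_of_subtree looks for)
def pvLZ (s : List Char) (i : Nat) : Option Nat :=
  (List.range' (i+1) (s.length - (i+1))).find? (fun j => pvPB s (j+1) == pvPB s i)

theorem pvPB_step (s : List Char) (k : Nat) :
    pvPB s (k+1) = pvPB s k + pvDelta (s.getD k ' ') := rfl

theorem pvPB_ge (s : List Char) (k : Nat) : pvPB s k - 1 ≤ pvPB s (k+1) := by
  rw [pvPB_step]
  unfold pvDelta
  split_ifs <;> omega

theorem pvFindLoop_spec (s : List Char) :
    ∀ (f : Nat) (pos : Nat) (sum : Int), 0 < sum → s.length ≤ f + pos →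
      pvFindLoop s f (pos : Int) sum =
        (match (List.range' (pos+1) (s.length - (pos+1))).find?
            (fun j => pvPB s (j+1) == pvPB s (pos+1) - sum) with
         | some j => (j : Int)
         | none => -1) := by
  intro f
  induction f with
  | zero =>
    intro pos sum hsum hf
    have hlen0 : s.length - (pos+1) = 0 := by omega
    rw [hlen0]
    simp [pvFindLoop, List.range']
  | succ f ih =>
    intro pos sum hsum hf
    have hδ : ∀ c : Char, -1 ≤ pvDelta c ∧ pvDelta c ≤ 1 := by
      intro c; unfold pvDelta; split_ifs <;> omega
    by_cases hend : (s.length : Int) ≤ (pos : Int) + 1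
    · have hle : s.length ≤ pos + 1 := by exact_mod_cast hend
      have hlen0 : s.length - (pos+1) = 0 := by omega
      rw [hlen0]
      simp only [pvFindLoop, List.range', List.find?]
      rw [if_pos hsum, if_pos (by omega : (pos : Int) + 1 ≥ (s.length : Int))]
    · have hplt : pos + 1 < s.length := by
        have h := not_le.mp hend
        exact_mod_cast h
      have hget : PySem.List.pyGet? s ((pos:Int)+1) = some (s.getD (pos+1) ' ') := by
        have hcast : ((pos:Int)+1) = (((pos+1 : Nat)) : Int) := by push_cast; ring
        rw [hcast, PySem.List.pyGet?_natCast, List.getElem?_eq_getElem hplt,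
          List.getD_eq_getElem?_getD, List.getElem?_eq_getElem hplt]
        rfl
      have hsum' : (if s.getD (pos+1) ' ' = '(' then sum + 1
          else if s.getD (pos+1) ' ' = ')' then sum - 1 else sum)
          = sum + pvDelta (s.getD (pos+1) ' ') := by
        unfold pvDelta; split_ifs <;> ring
      have hpb : pvPB s (pos+1+1) = pvPB s (pos+1) + pvDelta (s.getD (pos+1) ' ') :=
        pvPB_step s (pos+1)
      have hr : List.range' (pos+1) (s.length - (pos+1))
          = (pos+1) :: List.range' (pos+1+1) (s.length - (pos+2)) := by
        have h2 : s.length - (pos+1) = (s.length - (pos+2)) + 1 := by omega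
        rw [h2, List.range'_succ]
      simp only [pvFindLoop]
      rw [if_pos hsum, if_neg (by omega : ¬ ((pos : Int) + 1 ≥ (s.length : Int))), hget]
      simp only [hsum', hr, List.find?_cons]
      by_cases hz : sum + pvDelta (s.getD (pos+1) ' ') = 0
      · have hpred : (pvPB s (pos+1+1) == pvPB s (pos+1) - sum) = true := by
          rw [hpb]; simp only [beq_iff_eq]; omega
        rw [if_pos hz, hpred]
        push_cast; ring
      · have hpred : (pvPB s (pos+1+1) == pvPB s (pos+1) - sum) = false := by
          rw [hpb]; simp only [beq_eq_false_iff_ne, ne_eq]; omega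
        rw [if_neg hz, hpred]
        have hcast : ((pos:Int)+1) = (((pos+1 : Nat)) : Int) := by push_cast; ring
        rw [hcast, ih (pos+1) (sum + pvDelta (s.getD (pos+1) ' '))
          (by have := (hδ (s.getD (pos+1) ' ')).1; omega) (by omega)]
        have htgt : pvPB s (pos+1+1) - (sum + pvDelta (s.getD (pos+1) ' '))
            = pvPB s (pos+1) - sum := by rw [hpb]; ring
        rw [htgt]

theorem pvGet (s : List Char) (p : Nat) (hp : p < s.length) :
    PySem.List.pyGet? s (p:Int) = some (s.getD p ' ') := by
  rw [PySem.List.pyGet?_natCast, List.getElem?_eq_getElem hp,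
    List.getD_eq_getElem?_getD, List.getElem?_eq_getElem hp]
  rfl

theorem pvFindEnd_spec (s : List Char) (i : Nat) (hi : i < s.length)
    (hc : s.getD i ' ' = '(') :
    pvFindEnd s (i : Int) =
      (match pvLZ s i with | some j => (j : Int) | none => -1) := by
  unfold pvFindEnd
  rw [pvGet s i hi, hc]
  simp only [ne_eq, not_true_eq_false, if_false]
  rw [pvFindLoop_spec s (s.length + 1) i 1 (by omega) (by omega)]
  have htgt : pvPB s (i+1) - 1 = pvPB s i := by
    rw [pvPB_step, hc]; unfold pvDelta; simp
  rw [htgt]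
  rfl

theorem pvFindEnd_nonparen (s : List Char) (i : Nat) (hi : i < s.length)
    (hc : s.getD i ' ' ≠ '(') :
    pvFindEnd s (i : Int) = (i : Int) := by
  unfold pvFindEnd
  rw [pvGet s i hi]
  have hm : (match some (s.getD i ' ') with
      | none => (-1:Int)
      | some c => if c ≠ '(' then (i:Int) else pvFindLoop s (s.length+1) (i:Int) 1)
      = if s.getD i ' ' ≠ '(' then (i:Int) else pvFindLoop s (s.length+1) (i:Int) 1 := rfl
  rw [hm, if_pos hc]

theorem pvFind?_range'_some {p : Nat → Bool} :
    ∀ (n a j : Nat), (List.range' a n).find? p = some j →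
      a ≤ j ∧ j < a + n ∧ p j = true ∧ ∀ k, a ≤ k → k < j → p k = false := by
  intro n
  induction n with
  | zero => intro a j h; simp [List.range'] at h
  | succ n ih =>
    intro a j h
    rw [List.range'_succ, List.find?_cons] at h
    cases hpa : p a with
    | true =>
      rw [hpa] at h
      have hj : some a = some j := h
      obtain rfl : a = j := by injection hj
      exact ⟨le_refl a, by omega, hpa, fun k h1 h2 => by omega⟩
    | false =>
      rw [hpa] at h
      have h' : List.find? p (List.range' (a+1) n) = some j := h
      obtain ⟨h1, h2, h3, h4⟩ := ih (a+1) j h'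
      refine ⟨by omega, by omega, h3, fun k hk1 hk2 => ?_⟩
      rcases Nat.eq_or_lt_of_le hk1 with rfl | hlt
      · exact hpa
      · exact h4 k hlt hk2

theorem pvFind?_range'_some_of {p : Nat → Bool} :
    ∀ (n a j : Nat), a ≤ j → j < a + n → p j = true →
      (∀ k, a ≤ k → k < j → p k = false) →
      (List.range' a n).find? p = some j := by
  intro n
  induction n with
  | zero => intro a j h1 h2; omega
  | succ n ih =>
    intro a j h1 h2 h3 h4
    rw [List.range'_succ, List.find?_cons]
    rcases Nat.eq_or_lt_of_le h1 with rfl | hlt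
    · rw [h3]
    · rw [h4 a (le_refl a) hlt]
      exact ih (a+1) j hlt (by omega) h3 (fun k hk1 hk2 => h4 k (by omega) hk2)

theorem pvLZ_some_span (s : List Char) (i j : Nat) (hc : s.getD i ' ' = '(')
    (h : pvLZ s i = some j) : pvSpan s i (j+1) := by
  obtain ⟨h1, h2, h3, h4⟩ := pvFind?_range'_some _ _ _ h
  have h2' : j < s.length := by omega
  have hpb1 : pvPB s (i+1) = pvPB s i + 1 := by
    rw [pvPB_step, hc]; unfold pvDelta; simp
  have h3' : pvPB s (j+1) = pvPB s i := by simpa using h3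
  have main : ∀ k, i+1 ≤ k → k ≤ j → pvPB s i < pvPB s k := by
    intro k hk1
    induction k, hk1 using Nat.le_induction with
    | base => intro _; omega
    | succ k hk ihk =>
      intro hkj
      have hk' : pvPB s i < pvPB s k := ihk (by omega)
      have hne : pvPB s (k+1) ≠ pvPB s i := by
        have := h4 k hk (by omega)
        simpa using this
      have := pvPB_ge s k
      omega
  refine ⟨by omega, by omega, h3', fun k hk1 hk2 => ?_⟩
  exact main k (by omega) (by omega)

theorem pvSpan_lz (s : List Char) (i q : Nat) (h : pvSpan s i q) :
    pvLZ s i = some (q - 1) := by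
  obtain ⟨hq1, hq2, hq3, hq4⟩ := h
  apply pvFind?_range'_some_of
  · omega
  · omega
  · have : q - 1 + 1 = q := by omega
    rw [this]
    simpa using hq3
  · intro k hk1 hk2
    have : pvPB s i < pvPB s (k+1) := hq4 (k+1) (by omega) (by omega)
    simp only [beq_eq_false_iff_ne, ne_eq]
    omega

-- discrete crossing: prefix balance steps down by at most one
theorem pvPB_cross (s : List Char) (t : Int) :
    ∀ (d a : Nat), t ≤ pvPB s a → pvPB s (a+d) < t →
      ∃ k, a ≤ k ∧ k ≤ a + d ∧ pvPB s k = t := by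
  intro d
  induction d with
  | zero => intro a h1 h2; simp only [Nat.add_zero] at h2; omega
  | succ d ih =>
    intro a h1 h2
    rcases eq_or_lt_of_le h1 with he | hlt
    · exact ⟨a, le_refl a, by omega, he.symm⟩
    · have hs := pvPB_ge s a
      have h1' : t ≤ pvPB s (a+1) := by omega
      have h2' : pvPB s ((a+1)+d) < t := by
        have : (a+1)+d = a + (d+1) := by omega
        rw [this]; exact h2
      obtain ⟨k, hk1, hk2, hk3⟩ := ih (a+1) h1' h2'
      exact ⟨k, by omega, by omega, hk3⟩

-- balance transfers to slices
theorem pvPB_slice (s : List Char) (i m : Nat) (him : i + m ≤ s.length) :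
    ∀ k, k ≤ m → pvPB ((s.drop i).take m) k = pvPB s (i+k) - pvPB s i := by
  intro k
  induction k with
  | zero => intro _; simp [pvPB]
  | succ k ih =>
    intro hk
    have hk' : k ≤ m := by omega
    have hget : ((s.drop i).take m).getD k ' ' = s.getD (i+k) ' ' := by
      have hkm : k < m := by omega
      rw [List.getD_eq_getElem?_getD, List.getD_eq_getElem?_getD]
      rw [List.getElem?_take, if_pos hkm, List.getElem?_drop]
    have h1 : pvPB ((s.drop i).take m) (k+1)
        = pvPB ((s.drop i).take m) k + pvDelta (((s.drop i).take m).getD k ' ') := rfl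
    have h2 : pvPB s (i+(k+1)) = pvPB s (i+k) + pvDelta (s.getD (i+k) ' ') := rfl
    rw [h1, h2, ih hk', hget]
    ring

theorem pvLen_slice (s : List Char) (i m : Nat) (him : i + m ≤ s.length) :
    ((s.drop i).take m).length = m := by
  simp
  omega

theorem pvGetD_slice (s : List Char) (i m k : Nat) (hk : k < m) :
    ((s.drop i).take m).getD k ' ' = s.getD (i+k) ' ' := by
  rw [List.getD_eq_getElem?_getD, List.getD_eq_getElem?_getD]
  rw [List.getElem?_take, if_pos hk, List.getElem?_drop]

theorem pvTake_one (s : List Char) (p : Nat) (hp : p < s.length) :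
    (s.drop p).take 1 = [s.getD p ' '] := by
  rw [List.drop_eq_getElem_cons hp, List.take_succ_cons, List.take_zero]
  rw [List.getD_eq_getElem?_getD, List.getElem?_eq_getElem hp]
  rfl

-- ===== A-side characterisation =====

-- soundness: A true ⟹ the balance condition (read off A's top-level checks)
theorem pvA_sound (s : List Char) (f : Nat) (h : pvA s (f+1) = true) : pvCond s := by
  simp only [pvA] at h
  by_cases h1 : s.length = 1
  · exact Or.inl h1
  · rw [if_neg h1] at h
    by_cases hnil : s = []
    · subst hnil
      simp [PySem.List.pyGet?, PySem.List.pyIdx?] at h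
    · have hlen : 0 < s.length := List.length_pos_of_ne_nil hnil
      have hg0 : PySem.List.pyGet? s 0 = some (s.getD 0 ' ') := by
        simpa using pvGet s 0 hlen
      rw [hg0] at h
      set c := s.getD 0 ' ' with hcdef
      have hm : (match some c with
          | none => false
          | some c =>
            if c ≠ '(' then false
            else if pvFindEnd s 0 + 1 ≠ (s.length : Int) then false
            else if s.length = 3 then true
            else pvABody s f (s.length + 1) 2)
          = (if c ≠ '(' then false
            else if pvFindEnd s 0 + 1 ≠ (s.length : Int) then false
            else if s.length = 3 then true
            else pvABody s f (s.length + 1) 2) := rfl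
      rw [hm] at h
      by_cases hc : c = '('
      · rw [if_neg (by simp [hc])] at h
        by_cases hfe : pvFindEnd s 0 + 1 = (s.length : Int)
        · have hc' : s.getD 0 ' ' = '(' := hcdef ▸ hc
          have hfspec := pvFindEnd_spec s 0 hlen hc'
          rw [Nat.cast_zero] at hfspec
          rw [hfspec] at hfe
          cases hlz : pvLZ s 0 with
          | none =>
            rw [hlz] at hfe
            simp at hfe
            omega
          | some j =>
            rw [hlz] at hfe
            have hj : j + 1 = s.length := by
              have : ((j:Int)) + 1 = (s.length : Int) := hfe
              exact_mod_cast this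
            have hspan := pvLZ_some_span s 0 j hc' hlz
            rw [hj] at hspan
            obtain ⟨hs1, _, hs3, hs4⟩ := hspan
            have h00 : pvPB s 0 = 0 := rfl
            refine Or.inr ⟨by omega, hc', by rw [hs3, h00], fun k hk1 hk2 => ?_⟩
            have := hs4 k (by omega) hk2
            omega
        · rw [if_pos hfe] at h
          exact absurd h (by simp)
      · rw [if_pos hc] at h
        exact absurd h (by simp)

-- completeness of the child loop: under the balance condition A's while loop returns true
theorem pvABody_true (s : List Char)
    (hc0 : s.getD 0 ' ' = '(') (hz : pvPB s s.length = 0)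
    (hpos : ∀ k, 1 ≤ k → k < s.length → 0 < pvPB s k)
    (hIH : ∀ t : List Char, t.length < s.length → pvCond t → ∀ f, t.length + 1 ≤ f → pvA t f = true) :
    ∀ (lA p : Nat) (f : Nat), 2 ≤ p → p ≤ s.length → s.length - p < lA → s.length ≤ f →
      pvABody s f lA (p : Int) = true := by
  intro lA
  induction lA with
  | zero => intro p f _ _ hfuel _; omega
  | succ lA ih =>
    intro p f hp2 hplen hfuel hf
    simp only [pvABody]
    by_cases hcond : (p:Int) + 1 < (s.length : Int)
    · have hp1 : p + 1 < s.length := by exact_mod_cast hcond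
      rw [if_pos hcond]
      have hplt : p < s.length := by omega
      set c := s.getD p ' ' with hcdef
      have hposp : 0 < pvPB s p := hpos p (by omega) hplt
      by_cases hcp : c = '('
      · -- a parenthesized child: its end is the first return of the balance to the entry level
        have hpb1 : pvPB s (p+1) = pvPB s p + 1 := by
          rw [pvPB_step, ← hcdef, hcp]; unfold pvDelta; simp
        obtain ⟨k, hk1, hk2, hk3⟩ : ∃ k, p+1 ≤ k ∧ k ≤ (p+1) + (s.length - (p+1)) ∧
            pvPB s k = pvPB s p := by
          apply pvPB_cross s (pvPB s p) (s.length - (p+1)) (p+1) (by omega)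
          rw [show (p+1) + (s.length - (p+1)) = s.length by omega, hz]
          omega
        rw [show (p+1) + (s.length - (p+1)) = s.length by omega] at hk2
        have hk4 : p + 2 ≤ k := by
          rcases Nat.eq_or_lt_of_le hk1 with rfl | h
          · omega
          · omega
        have hlzsome : (pvLZ s p).isSome := by
          rw [pvLZ, List.find?_isSome]
          refine ⟨k-1, ?_, ?_⟩
          · rw [List.mem_range'_1]
            omega
          · simp only [beq_iff_eq]
            rw [show k-1+1 = k by omega]
            exact hk3
        obtain ⟨j0, hlz⟩ := Option.isSome_iff_exists.mp hlzsome
        have hspan := pvLZ_some_span s p j0 (hcdef ▸ hcp) hlz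
        set q := j0 + 1 with hqdef
        obtain ⟨hq1, hq2, hq3, hq4⟩ := hspan
        rw [pvFindEnd_spec s p hplt (hcdef ▸ hcp), hlz]
        rw [if_neg (by push_cast; omega : ¬ ((j0:Int) + 1 = 0))]
        have hcast : ((j0:Int)) + 1 = ((q:Nat) : Int) := by push_cast; omega
        rw [hcast, PySem.List.slice_natCast]
        set t := (s.drop p).take (q - p) with htdef
        have htlen : t.length = q - p := pvLen_slice s p (q-p) (by omega)
        have hcondt : pvCond t := by
          refine Or.inr ⟨by omega, ?_, ?_, ?_⟩
          · rw [htdef, pvGetD_slice s p (q-p) 0 (by omega)]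
            exact hcdef ▸ hcp
          · rw [htlen, htdef, pvPB_slice s p (q-p) (by omega) (q-p) (le_refl _),
              show p + (q-p) = q by omega]
            omega
          · intro m hm1 hm2
            rw [htlen] at hm2
            rw [htdef, pvPB_slice s p (q-p) (by omega) m (by omega)]
            have := hq4 (p+m) (by omega) (by omega)
            omega
        have hA := hIH t (by omega) hcondt f (by omega)
        rw [hA]
        simp only [Bool.not_true, Bool.false_eq_true, if_false]
        exact ih q f (by omega) (by omega) (by omega) hf
      · -- a one-character child, always parsable
        rw [pvFindEnd_nonparen s p hplt (hcdef ▸ hcp)]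
        rw [if_neg (by push_cast; omega : ¬ ((p:Int) + 1 = 0))]
        have hcast : ((p:Int)) + 1 = (((p+1:Nat)) : Int) := by push_cast; omega
        rw [hcast, PySem.List.slice_natCast, show (p+1) - p = 1 by omega,
          pvTake_one s p hplt]
        obtain ⟨f', rfl⟩ : ∃ f', f = f' + 1 := ⟨f - 1, by omega⟩
        have hone : pvA [s.getD p ' '] (f'+1) = true := by simp [pvA]
        rw [hone]
        simp only [Bool.not_true, Bool.false_eq_true, if_false]
        exact ih (p+1) (f'+1) (by omega) (by omega) (by omega) hf
    · rw [if_neg hcond]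

-- completeness: the balance condition ⟹ A true (for any sufficient fuel)
theorem pvA_complete : ∀ (n : Nat) (s : List Char), s.length ≤ n → pvCond s →
    ∀ f, s.length + 1 ≤ f → pvA s f = true := by
  intro n
  induction n with
  | zero =>
    intro s hn hcond f hf
    rcases hcond with h | ⟨h, _⟩ <;> omega
  | succ n ih =>
    intro s hn hcond f hf
    rcases hcond with h1 | ⟨h2, hc0, hz, hpos⟩
    · obtain ⟨f', rfl⟩ : ∃ f', f = f' + 1 := ⟨f - 1, by omega⟩
      simp only [pvA]
      rw [if_pos h1]
    · obtain ⟨f', rfl⟩ : ∃ f', f = f' + 1 := ⟨f - 1, by omega⟩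
      simp only [pvA]
      rw [if_neg (by omega)]
      have hlen : 0 < s.length := by omega
      have hg0 : PySem.List.pyGet? s 0 = some (s.getD 0 ' ') := by
        simpa using pvGet s 0 hlen
      rw [hg0]
      have hm : (match some (s.getD 0 ' ') with
          | none => false
          | some c =>
            if c ≠ '(' then false
            else if pvFindEnd s 0 + 1 ≠ (s.length : Int) then false
            else if s.length = 3 then true
            else pvABody s f' (s.length + 1) 2)
          = (if s.getD 0 ' ' ≠ '(' then false
            else if pvFindEnd s 0 + 1 ≠ (s.length : Int) then false
            else if s.length = 3 then true
            else pvABody s f' (s.length + 1) 2) := rfl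
      rw [hm, if_neg (not_not_intro hc0)]
      have hspan : pvSpan s 0 s.length := by
        refine ⟨by omega, le_refl _, ?_, fun k hk1 hk2 => ?_⟩
        · rw [hz]; rfl
        · have h00 : pvPB s 0 = 0 := rfl
          rw [h00]
          exact hpos k (by omega) hk2
      have hfe : pvFindEnd s 0 = ((s.length - 1 : Nat) : Int) := by
        have h := pvFindEnd_spec s 0 hlen hc0
        rw [Nat.cast_zero] at h
        rw [h, pvSpan_lz s 0 s.length hspan]
      rw [if_neg (by rw [hfe]; push_cast; omega)]
      by_cases h3 : s.length = 3
      · rw [if_pos h3]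
      · rw [if_neg h3]
        apply pvABody_true s hc0 hz hpos _ (s.length + 1) 2 f' (le_refl _) (by omega)
          (by omega) (by omega)
        intro t htlt hcondt g hg
        exact ih t (by omega) hcondt g hg

-- ===== B-side characterisation =====

theorem pvScan_spec (s : List Char) :
    ∀ (rest : List Char) (i : Nat), rest = s.drop i → i ≤ s.length →
      (pvScan s.length rest i (pvPB s i) = true
        ↔ ((∀ k, i < k → k < s.length → pvPB s k ≠ 0) ∧ pvPB s s.length = 0 ∧ i < s.length)) := by
  intro rest
  induction rest with
  | nil =>
    intro i hrest hi
    have hlen : s.length ≤ i := by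
      have := congrArg List.length hrest
      simp at this
      omega
    simp only [pvScan]
    constructor
    · intro h; exact absurd h (by simp)
    · rintro ⟨_, _, h⟩; omega
  | cons c rest ih =>
    intro i hrest hi
    have hilt : i < s.length := by
      have := congrArg List.length hrest
      simp at this
      omega
    have hc : c = s.getD i ' ' := by
      have : (s.drop i).head? = some c := by rw [← hrest]; rfl
      rw [List.head?_drop, List.getElem?_eq_getElem hilt] at this
      rw [List.getD_eq_getElem?_getD, List.getElem?_eq_getElem hilt]
      injection this with h
      exact h.symm
    have hrest' : rest = s.drop (i+1) := by
      have : (s.drop i).tail = rest := by rw [← hrest]; rfl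
      rw [← this, List.tail_drop]
    have hbal : (if c = '(' then pvPB s i + 1 else if c = ')' then pvPB s i - 1 else pvPB s i)
        = pvPB s (i+1) := by
      rw [pvPB_step, ← hc]
      unfold pvDelta
      split_ifs <;> ring
    simp only [pvScan, hbal]
    by_cases hz : pvPB s (i+1) = 0
    · rw [if_pos hz]
      by_cases hend : i + 1 = s.length
      · simp only [decide_eq_true_eq]
        constructor
        · intro _
          exact ⟨fun k h1 h2 => by omega, by rw [← hend]; exact hz, hilt⟩
        · intro _; omega
      · simp only [decide_eq_true_eq]
        constructor
        · intro h; omega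
        · rintro ⟨hne, _, _⟩
          exact absurd hz (hne (i+1) (by omega) (by omega))
    · rw [if_neg hz, ih (i+1) hrest' (by omega)]
      constructor
      · rintro ⟨h1, h2, h3⟩
        refine ⟨fun k hk1 hk2 => ?_, h2, hilt⟩
        rcases Nat.eq_or_lt_of_le hk1 with rfl | hlt
        · exact hz
        · exact h1 k hlt hk2
      · rintro ⟨h1, h2, _⟩
        refine ⟨fun k hk1 hk2 => h1 k (by omega) hk2, h2, ?_⟩
        rcases Nat.lt_or_ge (i+1) s.length with hlt | hge
        · exact hlt
        · exfalso
          have he : i+1 = s.length := by omega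
          rw [he] at hz
          exact hz h2

-- positivity from non-vanishing: the balance starts at 1 after '(' and steps by at most one
theorem pvPos_of_ne (s : List Char) (hc0 : s.getD 0 ' ' = '(')
    (hne : ∀ k, 0 < k → k < s.length → pvPB s k ≠ 0) :
    ∀ k, 1 ≤ k → k < s.length → 0 < pvPB s k := by
  intro k hk1
  induction k, hk1 using Nat.le_induction with
  | base =>
    intro _
    rw [show (1:Nat) = 0 + 1 from rfl, pvPB_step, hc0]
    unfold pvDelta pvPB
    simp
  | succ k hk ihk =>
    intro hlt
    have h1 : 0 < pvPB s k := ihk (by omega)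
    have h2 : pvPB s (k+1) ≠ 0 := hne (k+1) (by omega) hlt
    have h3 := pvPB_ge s k
    omega

theorem pvAlt_iff (s : String) (hs : s.toList ≠ []) :
    is_parsable_alt s = true ↔ pvCond s.toList := by
  set t := s.toList with ht
  have hlen : 0 < t.length := List.length_pos_of_ne_nil hs
  unfold is_parsable_alt
  rw [← ht]
  by_cases h1 : t.length = 1
  · rw [if_pos h1]
    simp [pvCond, h1]
  · rw [if_neg h1]
    have hhg : t.headD ' ' = t.getD 0 ' ' := by
      match t, hs with
      | a :: l, _ => rfl
    by_cases hc0 : t.getD 0 ' ' = '('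
    · rw [if_neg (by rw [hhg, hc0]; simp; omega)]
      have h0 : pvPB t 0 = 0 := rfl
      have hscan := pvScan_spec t t 0 (by simp) (by omega)
      rw [h0] at hscan
      rw [hscan]
      unfold pvCond
      constructor
      · rintro ⟨hne, hz, _⟩
        exact Or.inr ⟨by omega, hc0, hz, pvPos_of_ne t hc0 (fun k a b => hne k a b)⟩
      · rintro (h | ⟨h2, _, hz, hpos⟩)
        · omega
        · exact ⟨fun k hk1 hk2 => by have := hpos k (by omega) hk2; omega, hz, by omega⟩
    · rw [if_pos (by
        simp only [Bool.or_eq_true, decide_eq_true_eq, Bool.not_eq_true']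
        right
        rw [hhg] at *
        simp only [beq_eq_false_iff_ne, ne_eq]
        exact hc0)]
      constructor
      · intro h; exact absurd h (by simp)
      · rintro (h | ⟨_, h, _⟩)
        · omega
        · exact absurd h hc0

theorem pvA_iff (s : String) (hs : s.toList ≠ []) :
    is_parsable s = true ↔ pvCond s.toList := by
  unfold is_parsable
  constructor
  · intro h
    exact pvA_sound s.toList s.toList.length h
  · intro h
    exact pvA_complete s.toList.length s.toList (le_refl _) h _ (le_refl _)

-- ===== VERDICT (by name: the statement is the Claim_ definition above) =====
theorem is_parsable_spec : Claim_equal_is_parsable := by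
  intro sentence _ hpre
  unfold Spec_is_parsable
  have hA := pvA_iff sentence hpre
  have hB := pvAlt_iff sentence hpre
  cases hA' : is_parsable sentence with
  | true => exact ((hB.mpr (hA.mp hA')).symm)
  | false =>
    cases hB' : is_parsable_alt sentence with
    | true => exact absurd (by rw [hA.mpr (hB.mp hB')] at hA'; exact hA') (by simp)
    | false => rfl
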